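-- pv_equiv track=rewrite | github.com/holmstefan/sorsim | minimal/functions/tools.py | map_species
-- ===== SOURCE A (Python) =====
-- def map_species(latin_species):
--     species_mapping = {}
--
--     for species in latin_species:
--         if "Pinus" in species:
--             species_mapping[species] = "Foehre"
--         elif "Picea abies" in species:
--             species_mapping[species] = "Fichte"
--         elif "Abies alba" in species:
--             species_mapping[species] = "Tanne"
--         elif "Larix decidua" in species:
--             species_mapping[species] = "Laerche"
--         elif "Fagus sylvatica" in species:
--             species_mapping[species] = "Buche"
--         elif "Quercus" in species:
--             species_mapping[species] = "Eiche"
--         elif "Fraxinus excelsior" in species: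
--             species_mapping[species] = "Esche"
--         elif "Acer" in species:
--             species_mapping[species] = "Ahorn"
--         elif "Pseudotsuga menziesii" in species:
--             species_mapping[species] = "Ubrige Nadelholzer"
--         elif "Taxus" in species: #Taxus baccata
--             species_mapping[species] = "Ubrige Nadelholzer"
--         elif "Thuja" in species: #Thuja occidentalis
--             species_mapping[species] = "Ubrige Nadelholzer"
--         elif "Acer" in species: #Acer pseudoplatanus, Acer campestre, Acer platanoides
--             species_mapping[species] = "Ubrige Laubholzer"
--         elif "Alnus" in species: #Alnus glutinosa, Alnus incana, Alnus viridis
--             species_mapping[species] = "Ubrige Laubholzer"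
--         elif "Betula" in species: #Betula pendula, Betula pubescens
--             species_mapping[species] = "Ubrige Laubholzer"
--         elif "Carpinus" in species: #Carpinus betulus
--             species_mapping[species] = "Ubrige Laubholzer"
--         elif "Castanea" in species: #Castanea sativa
--             species_mapping[species] = "Ubrige Laubholzer"
--         elif "Corylus" in species: #Corylus avellana
--             species_mapping[species] = "Ubrige Laubholzer"
--         elif "Populus" in species: #Populus nigra, Populus tremula
--             species_mapping[species] = "Ubrige Laubholzer"
--         elif "Salix" in species: #Salix Alba
--             species_mapping[species] = "Ubrige Laubholzer"
--         elif "Sorbus" in species: #Sorbus aria, Sorbus aucuparia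
--             species_mapping[species] = "Ubrige Laubholzer"
--         elif "Tilia" in species: #Tilia cordata, Tilia platyphyllos
--             species_mapping[species] = "Ubrige Laubholzer"
--         elif "Ulmus glabra" in species:
--             species_mapping[species] = "Ubrige Laubholzer"
--         # If none of the specific conditions match, you can label it as "Ubrige" (Other)
--         else:
--             species_mapping[species] = "Ubrige"
--     return species_mapping
-- ===== SOURCE B (Python) =====
-- _SPECIES_TABLE = (
--     ("Pinus", "Foehre"),
--     ("Picea abies", "Fichte"),
--     ("Abies alba", "Tanne"),
--     ("Larix decidua", "Laerche"),
--     ("Fagus sylvatica", "Buche"),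
--     ("Quercus", "Eiche"),
--     ("Fraxinus excelsior", "Esche"),
--     ("Acer", "Ahorn"),
--     ("Pseudotsuga menziesii", "Ubrige Nadelholzer"),
--     ("Taxus", "Ubrige Nadelholzer"),
--     ("Thuja", "Ubrige Nadelholzer"),
--     ("Alnus", "Ubrige Laubholzer"),
--     ("Betula", "Ubrige Laubholzer"),
--     ("Carpinus", "Ubrige Laubholzer"),
--     ("Castanea", "Ubrige Laubholzer"),
--     ("Corylus", "Ubrige Laubholzer"),
--     ("Populus", "Ubrige Laubholzer"),
--     ("Salix", "Ubrige Laubholzer"),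
--     ("Sorbus", "Ubrige Laubholzer"),
--     ("Tilia", "Ubrige Laubholzer"),
--     ("Ulmus glabra", "Ubrige Laubholzer"),
-- )
--
-- def map_species(latin_species):
--     # Pattern-major two-phase sweep: start everything at the default label, then
--     # walk the pattern table in REVERSE order, overwriting the label of every
--     # species the pattern occurs in.  The last overwrite for a species comes from
--     # the earliest matching pattern, so this reproduces first-match priority.
--     labels = {}
--     for species in latin_species:
--         labels[species] = "Ubrige"
--     for sub, label in reversed(_SPECIES_TABLE):
--         for species in latin_species:
--             if sub in species:
--                 labels[species] = label
--     return labels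
-- ===== Notes on version B (the rewrite author's own statement) =====
-- stated objective: alternative
-- what changed: Replaced the per-species first-match elif chain by a pattern-major two-phase sweep: every species is first labelled 'Ubrige', then the (substring, label) table is walked in reverse order overwriting the labels of matching species, so the last overwrite realises the original first-match priority.
import Mathlib
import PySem

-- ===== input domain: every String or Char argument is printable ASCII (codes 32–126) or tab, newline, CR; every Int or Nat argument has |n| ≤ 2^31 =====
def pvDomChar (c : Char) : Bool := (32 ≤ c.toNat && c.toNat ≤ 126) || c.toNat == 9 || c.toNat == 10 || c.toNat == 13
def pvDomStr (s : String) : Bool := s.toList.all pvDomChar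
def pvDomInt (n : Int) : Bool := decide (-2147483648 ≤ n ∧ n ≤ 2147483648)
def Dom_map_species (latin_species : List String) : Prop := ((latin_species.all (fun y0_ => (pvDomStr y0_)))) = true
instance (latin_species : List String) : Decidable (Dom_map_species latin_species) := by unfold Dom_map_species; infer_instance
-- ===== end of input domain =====

-- B replaces A's per-species elif chain by a pattern-major two-phase sweep (default label, then reverse-order overwrite per table pattern); objective: alternative, same asymptotic cost.


-- ===== PORT A =====
-- literal transliteration of the elif chain, inserting into a PySem.Dict per species
def map_species (latin_species : List String) : List (String × String) :=
  (latin_species.foldl (fun (d : PySem.Dict String String) species =>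
    if PySem.Str.isIn "Pinus" species then d.insert species "Foehre"
    else if PySem.Str.isIn "Picea abies" species then d.insert species "Fichte"
    else if PySem.Str.isIn "Abies alba" species then d.insert species "Tanne"
    else if PySem.Str.isIn "Larix decidua" species then d.insert species "Laerche"
    else if PySem.Str.isIn "Fagus sylvatica" species then d.insert species "Buche"
    else if PySem.Str.isIn "Quercus" species then d.insert species "Eiche"
    else if PySem.Str.isIn "Fraxinus excelsior" species then d.insert species "Esche"
    else if PySem.Str.isIn "Acer" species then d.insert species "Ahorn"
    else if PySem.Str.isIn "Pseudotsuga menziesii" species then d.insert species "Ubrige Nadelholzer"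
    else if PySem.Str.isIn "Taxus" species then d.insert species "Ubrige Nadelholzer"
    else if PySem.Str.isIn "Thuja" species then d.insert species "Ubrige Nadelholzer"
    else if PySem.Str.isIn "Acer" species then d.insert species "Ubrige Laubholzer"
    else if PySem.Str.isIn "Alnus" species then d.insert species "Ubrige Laubholzer"
    else if PySem.Str.isIn "Betula" species then d.insert species "Ubrige Laubholzer"
    else if PySem.Str.isIn "Carpinus" species then d.insert species "Ubrige Laubholzer"
    else if PySem.Str.isIn "Castanea" species then d.insert species "Ubrige Laubholzer"
    else if PySem.Str.isIn "Corylus" species then d.insert species "Ubrige Laubholzer"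
    else if PySem.Str.isIn "Populus" species then d.insert species "Ubrige Laubholzer"
    else if PySem.Str.isIn "Salix" species then d.insert species "Ubrige Laubholzer"
    else if PySem.Str.isIn "Sorbus" species then d.insert species "Ubrige Laubholzer"
    else if PySem.Str.isIn "Tilia" species then d.insert species "Ubrige Laubholzer"
    else if PySem.Str.isIn "Ulmus glabra" species then d.insert species "Ubrige Laubholzer"
    else d.insert species "Ubrige") PySem.Dict.empty).items

-- ===== PORT B =====
def speciesTable : List (String × String) :=
  [("Pinus", "Foehre"), ("Picea abies", "Fichte"), ("Abies alba", "Tanne"),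
   ("Larix decidua", "Laerche"), ("Fagus sylvatica", "Buche"), ("Quercus", "Eiche"),
   ("Fraxinus excelsior", "Esche"), ("Acer", "Ahorn"),
   ("Pseudotsuga menziesii", "Ubrige Nadelholzer"), ("Taxus", "Ubrige Nadelholzer"),
   ("Thuja", "Ubrige Nadelholzer"), ("Alnus", "Ubrige Laubholzer"),
   ("Betula", "Ubrige Laubholzer"), ("Carpinus", "Ubrige Laubholzer"),
   ("Castanea", "Ubrige Laubholzer"), ("Corylus", "Ubrige Laubholzer"),
   ("Populus", "Ubrige Laubholzer"), ("Salix", "Ubrige Laubholzer"),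
   ("Sorbus", "Ubrige Laubholzer"), ("Tilia", "Ubrige Laubholzer"),
   ("Ulmus glabra", "Ubrige Laubholzer")]

-- phase 1: default every species to "Ubrige"; phase 2: sweep the table in
-- reverse, overwriting the label of every species the pattern occurs in
def map_species_alt (latin_species : List String) : List (String × String) :=
  (speciesTable.reverse.foldl
    (fun d p =>
      latin_species.foldl
        (fun d species => if PySem.Str.isIn p.1 species then d.insert species p.2 else d) d)
    (latin_species.foldl
      (fun (d : PySem.Dict String String) species => d.insert species "Ubrige")
      PySem.Dict.empty)).items

-- ===== PRECONDITION & SPEC =====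
def Spec_map_species (latin_species : List String) (out : List (String × String)) : Prop := out = map_species_alt latin_species
instance (latin_species : List String) (out : List (String × String)) : Decidable (Spec_map_species latin_species out) := by unfold Spec_map_species; infer_instance

-- ===== CLAIM (what is proved, stated in full; the proofs are below) =====
def Claim_equal_map_species : Prop := ∀ (latin_species : List String), Dom_map_species latin_species → Spec_map_species latin_species (map_species latin_species)

-- ===== LEMMAS AND PROOFS =====
-- the label A's elif chain assigns (proof helper)
def chainLabel (species : String) : String :=
    if PySem.Str.isIn "Pinus" species then "Foehre"
    else if PySem.Str.isIn "Picea abies" species then "Fichte"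
    else if PySem.Str.isIn "Abies alba" species then "Tanne"
    else if PySem.Str.isIn "Larix decidua" species then "Laerche"
    else if PySem.Str.isIn "Fagus sylvatica" species then "Buche"
    else if PySem.Str.isIn "Quercus" species then "Eiche"
    else if PySem.Str.isIn "Fraxinus excelsior" species then "Esche"
    else if PySem.Str.isIn "Acer" species then "Ahorn"
    else if PySem.Str.isIn "Pseudotsuga menziesii" species then "Ubrige Nadelholzer"
    else if PySem.Str.isIn "Taxus" species then "Ubrige Nadelholzer"
    else if PySem.Str.isIn "Thuja" species then "Ubrige Nadelholzer"
    else if PySem.Str.isIn "Acer" species then "Ubrige Laubholzer"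
    else if PySem.Str.isIn "Alnus" species then "Ubrige Laubholzer"
    else if PySem.Str.isIn "Betula" species then "Ubrige Laubholzer"
    else if PySem.Str.isIn "Carpinus" species then "Ubrige Laubholzer"
    else if PySem.Str.isIn "Castanea" species then "Ubrige Laubholzer"
    else if PySem.Str.isIn "Corylus" species then "Ubrige Laubholzer"
    else if PySem.Str.isIn "Populus" species then "Ubrige Laubholzer"
    else if PySem.Str.isIn "Salix" species then "Ubrige Laubholzer"
    else if PySem.Str.isIn "Sorbus" species then "Ubrige Laubholzer"
    else if PySem.Str.isIn "Tilia" species then "Ubrige Laubholzer"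
    else if PySem.Str.isIn "Ulmus glabra" species then "Ubrige Laubholzer"
    else "Ubrige"

-- the label B's reverse overwrite sweep leaves on a species present from phase 1
def sweepLabel (species : String) (start : String) : String :=
  speciesTable.reverse.foldl (fun acc p => if PySem.Str.isIn p.1 species then p.2 else acc) start

-- A's branch-wise inserts collapse to one insert of the chain's label
set_option maxHeartbeats 1000000 in
theorem step_eq (d : PySem.Dict String String) (species : String) :
    (if PySem.Str.isIn "Pinus" species then d.insert species "Foehre"
    else if PySem.Str.isIn "Picea abies" species then d.insert species "Fichte"
    else if PySem.Str.isIn "Abies alba" species then d.insert species "Tanne"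
    else if PySem.Str.isIn "Larix decidua" species then d.insert species "Laerche"
    else if PySem.Str.isIn "Fagus sylvatica" species then d.insert species "Buche"
    else if PySem.Str.isIn "Quercus" species then d.insert species "Eiche"
    else if PySem.Str.isIn "Fraxinus excelsior" species then d.insert species "Esche"
    else if PySem.Str.isIn "Acer" species then d.insert species "Ahorn"
    else if PySem.Str.isIn "Pseudotsuga menziesii" species then d.insert species "Ubrige Nadelholzer"
    else if PySem.Str.isIn "Taxus" species then d.insert species "Ubrige Nadelholzer"
    else if PySem.Str.isIn "Thuja" species then d.insert species "Ubrige Nadelholzer"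
    else if PySem.Str.isIn "Acer" species then d.insert species "Ubrige Laubholzer"
    else if PySem.Str.isIn "Alnus" species then d.insert species "Ubrige Laubholzer"
    else if PySem.Str.isIn "Betula" species then d.insert species "Ubrige Laubholzer"
    else if PySem.Str.isIn "Carpinus" species then d.insert species "Ubrige Laubholzer"
    else if PySem.Str.isIn "Castanea" species then d.insert species "Ubrige Laubholzer"
    else if PySem.Str.isIn "Corylus" species then d.insert species "Ubrige Laubholzer"
    else if PySem.Str.isIn "Populus" species then d.insert species "Ubrige Laubholzer"
    else if PySem.Str.isIn "Salix" species then d.insert species "Ubrige Laubholzer"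
    else if PySem.Str.isIn "Sorbus" species then d.insert species "Ubrige Laubholzer"
    else if PySem.Str.isIn "Tilia" species then d.insert species "Ubrige Laubholzer"
    else if PySem.Str.isIn "Ulmus glabra" species then d.insert species "Ubrige Laubholzer"
    else d.insert species "Ubrige")
    = d.insert species (chainLabel species) := by
  unfold chainLabel
  simp only [apply_ite (d.insert species)]

-- B's reverse sweep from the default computes exactly A's chain label
set_option maxHeartbeats 4000000 in
theorem sweep_eq_chain (species : String) :
    sweepLabel species "Ubrige" = chainLabel species := by
  unfold sweepLabel speciesTable chainLabel
  simp only [List.reverse_cons, List.reverse_nil, List.nil_append, List.cons_append,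
    List.foldl_cons, List.foldl_nil]
  by_cases h1 : PySem.Str.isIn "Pinus" species
  · rw [if_pos h1, if_pos h1]
  rw [if_neg h1, if_neg h1]
  by_cases h2 : PySem.Str.isIn "Picea abies" species
  · rw [if_pos h2, if_pos h2]
  rw [if_neg h2, if_neg h2]
  by_cases h3 : PySem.Str.isIn "Abies alba" species
  · rw [if_pos h3, if_pos h3]
  rw [if_neg h3, if_neg h3]
  by_cases h4 : PySem.Str.isIn "Larix decidua" species
  · rw [if_pos h4, if_pos h4]
  rw [if_neg h4, if_neg h4]
  by_cases h5 : PySem.Str.isIn "Fagus sylvatica" species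
  · rw [if_pos h5, if_pos h5]
  rw [if_neg h5, if_neg h5]
  by_cases h6 : PySem.Str.isIn "Quercus" species
  · rw [if_pos h6, if_pos h6]
  rw [if_neg h6, if_neg h6]
  by_cases h7 : PySem.Str.isIn "Fraxinus excelsior" species
  · rw [if_pos h7, if_pos h7]
  rw [if_neg h7, if_neg h7]
  by_cases h8 : PySem.Str.isIn "Acer" species
  · rw [if_pos h8, if_pos h8]
  rw [if_neg h8, if_neg h8]
  by_cases h9 : PySem.Str.isIn "Pseudotsuga menziesii" species
  · rw [if_pos h9, if_pos h9]
  rw [if_neg h9, if_neg h9]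
  by_cases h10 : PySem.Str.isIn "Taxus" species
  · rw [if_pos h10, if_pos h10]
  rw [if_neg h10, if_neg h10]
  by_cases h11 : PySem.Str.isIn "Thuja" species
  · rw [if_pos h11, if_pos h11]
  rw [if_neg h11, if_neg h11]
  rw [if_neg h8]

-- value after a fold of unconditional inserts whose value depends only on the key
theorem getD_foldl_insert_fun (f : String → String) (ls : List String) (d : PySem.Dict String String)
    (k dflt : String) :
    (ls.foldl (fun d s => d.insert s (f s)) d).getD k dflt
      = if k ∈ ls then f k else d.getD k dflt := by
  induction ls generalizing d with
  | nil => simp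
  | cons s rest ih =>
      rw [List.foldl_cons, ih]
      rw [PySem.Dict.getD_insert]
      by_cases hk : k ∈ rest
      · simp [hk]
      · by_cases hs : k = s
        · simp [hs]
        · simp [hk, hs]

-- value after one conditional overwrite pass (B's inner loop) at any key
theorem getD_inner (c : String → Bool) (v : String) (ls : List String)
    (d : PySem.Dict String String) (k dflt : String) :
    (ls.foldl (fun d s => if c s then d.insert s v else d) d).getD k dflt
      = if k ∈ ls ∧ c k = true then v else d.getD k dflt := by
  induction ls generalizing d with
  | nil => simp
  | cons s rest ih =>
      rw [List.foldl_cons, ih]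
      by_cases hk : k ∈ rest ∧ c k = true
      · simp [hk]
      · simp only [if_neg hk]
        by_cases hcs : c s = true
        · rw [if_pos hcs, PySem.Dict.getD_insert]
          by_cases hs : k = s
          · subst hs
            rw [if_pos rfl, if_pos ⟨List.mem_cons_self .., hcs⟩]
          · rw [if_neg hs, if_neg (fun h => by
              rcases List.mem_cons.1 h.1 with h1 | h1
              · exact hs h1
              · exact hk ⟨h1, h.2⟩)]
        · rw [if_neg hcs, if_neg (fun h => by
            rcases List.mem_cons.1 h.1 with h1 | h1
            · subst h1; exact hcs h.2
            · exact hk ⟨h1, h.2⟩)]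

-- one conditional overwrite pass leaves the key list unchanged when every key is present
theorem keys_inner (c : String → Bool) (v : String) (ls : List String)
    (d : PySem.Dict String String) (h : ∀ s ∈ ls, s ∈ d.keys) :
    (ls.foldl (fun d s => if c s then d.insert s v else d) d).keys = d.keys := by
  induction ls generalizing d with
  | nil => rfl
  | cons s rest ih =>
      rw [List.foldl_cons]
      by_cases hc : c s = true
      · have hcont : d.contains s = true := by
          rw [PySem.Dict.contains_iff_mem_keys]
          exact h s (List.mem_cons_self ..)
        have hkeys : (d.insert s v).keys = d.keys := PySem.Dict.keys_insert_of_contains d v hcont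
        rw [if_pos hc]
        rw [ih (d.insert s v) (by rw [hkeys]; exact fun t ht => h t (List.mem_cons_of_mem _ ht)),
          hkeys]
      · rw [if_neg (by simp [hc])]
        exact ih d (fun t ht => h t (List.mem_cons_of_mem _ ht))

-- value and keys after B's whole reverse sweep (outer fold over an arbitrary table)
theorem sweep_spec (tbl : List (String × String)) (ls : List String)
    (d : PySem.Dict String String) (hkeys : ∀ s ∈ ls, s ∈ d.keys) (k dflt : String) :
    (tbl.foldl
        (fun d p => ls.foldl
          (fun d s => if PySem.Str.isIn p.1 s then d.insert s p.2 else d) d) d).keys = d.keys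
    ∧ (tbl.foldl
        (fun d p => ls.foldl
          (fun d s => if PySem.Str.isIn p.1 s then d.insert s p.2 else d) d) d).getD k dflt
      = if k ∈ ls then
          tbl.foldl (fun acc p => if PySem.Str.isIn p.1 k then p.2 else acc) (d.getD k dflt)
        else d.getD k dflt := by
  induction tbl generalizing d with
  | nil => simp
  | cons p rest ih =>
      have hkin := keys_inner (fun s => PySem.Str.isIn p.1 s) p.2 ls d hkeys
      have hnext : ∀ s ∈ ls, s ∈ (ls.foldl
          (fun d s => if PySem.Str.isIn p.1 s then d.insert s p.2 else d) d).keys := by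
        intro s hs; rw [hkin]; exact hkeys s hs
      obtain ⟨ihk, ihv⟩ := ih _ hnext
      constructor
      · rw [List.foldl_cons, ihk, hkin]
      · rw [List.foldl_cons, ihv, getD_inner]
        by_cases hk : k ∈ ls
        · simp only [if_pos hk, List.foldl_cons]
          by_cases hc : PySem.Str.isIn p.1 k
          · rw [if_pos ⟨hk, hc⟩, if_pos hc]
          · rw [if_neg (fun h => hc h.2), if_neg hc]
        · simp only [if_neg hk]
          rw [if_neg (fun h => hk h.1)]

-- ===== VERDICT (by name: the statement is the Claim_ definition above) =====
theorem map_species_spec : Claim_equal_map_species := by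
  intro ls _
  unfold Spec_map_species map_species map_species_alt
  simp only [step_eq]
  set dA := ls.foldl (fun (d : PySem.Dict String String) s => d.insert s (chainLabel s))
    PySem.Dict.empty with hdA
  set d0 := ls.foldl (fun (d : PySem.Dict String String) s => d.insert s "Ubrige")
    PySem.Dict.empty with hd0
  set dB := speciesTable.reverse.foldl
    (fun d p => ls.foldl
      (fun d s => if PySem.Str.isIn p.1 s then d.insert s p.2 else d) d) d0 with hdB
  have hkA : dA.keys = PySem.Set.ofList ls := by
    rw [hdA, PySem.Dict.keys_foldl_insert]
    simp [PySem.Set.update_nil_left]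
  have hk0 : d0.keys = PySem.Set.ofList ls := by
    rw [hd0, PySem.Dict.keys_foldl_insert]
    simp [PySem.Set.update_nil_left]
  have hmem : ∀ s ∈ ls, s ∈ d0.keys := by
    intro s hs; rw [hk0]; exact (PySem.Set.mem_ofList ls s).2 hs
  have hsw := fun k dflt => sweep_spec speciesTable.reverse ls d0 hmem k dflt
  have hkB : dB.keys = PySem.Set.ofList ls := by
    rw [hdB, (hsw "" "").1, hk0]
  have hndA : dA.keys.Nodup := by rw [hkA]; exact PySem.Set.nodup_ofList ls
  have hndB : dB.keys.Nodup := by rw [hkB]; exact PySem.Set.nodup_ofList ls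
  rw [PySem.Dict.items_eq_map_keys dA hndA "", PySem.Dict.items_eq_map_keys dB hndB "",
    hkA, hkB]
  apply List.map_congr_left
  intro k hkmem
  have hk : k ∈ ls := (PySem.Set.mem_ofList ls k).1 hkmem
  have hA : dA.getD k "" = chainLabel k := by
    rw [hdA, getD_foldl_insert_fun chainLabel ls PySem.Dict.empty k ""]
    simp [hk]
  have h0 : d0.getD k "" = "Ubrige" := by
    rw [hd0, getD_foldl_insert_fun (fun _ => "Ubrige") ls PySem.Dict.empty k ""]
    simp [hk]
  have hB : dB.getD k "" = chainLabel k := by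
    rw [hdB, (hsw k "").2, if_pos hk, h0]
    have hsweep := sweep_eq_chain k
    unfold sweepLabel at hsweep
    exact hsweep
  rw [hA, hB]
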